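-- pv_equiv track=rewrite | github.com/Clarisse-Francese/GithubClarisse | Ex de base.py | cul_de_chouette
-- ===== SOURCE A (Python) =====
-- def cul_de_chouette (valeur) :
--     res = list()
--     for i in range (1,7):
--         for j in range (i,7):
--             for k in range (j,7):
--                 if k+i+j == valeur :
--                     res.append((i,j,k))
--
--     return res
-- ===== SOURCE B (Python) =====
-- def cul_de_chouette(valeur):
--     # Recursive descent: pick each die value in non-decreasing order,
--     # reducing the remaining sum; generalises over the number of dice.
--     def go(lo, left, target):
--         if left == 1:
--             return [[target]] if lo <= target <= 6 else []
--         out = []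
--         for d in range(lo, 7):
--             for rest in go(d, left - 1, target - d):
--                 out.append([d] + rest)
--         return out
--     return [tuple(t) for t in go(1, 3, valeur)]
-- ===== Notes on version B (the rewrite author's own statement) =====
-- stated objective: alternative
-- what changed: Replaces the three fixed nested loops with a recursive descent that picks die values in non-decreasing order while reducing the remaining target sum (generalised over the number of dice), pruning at the last die.
import Mathlib
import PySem

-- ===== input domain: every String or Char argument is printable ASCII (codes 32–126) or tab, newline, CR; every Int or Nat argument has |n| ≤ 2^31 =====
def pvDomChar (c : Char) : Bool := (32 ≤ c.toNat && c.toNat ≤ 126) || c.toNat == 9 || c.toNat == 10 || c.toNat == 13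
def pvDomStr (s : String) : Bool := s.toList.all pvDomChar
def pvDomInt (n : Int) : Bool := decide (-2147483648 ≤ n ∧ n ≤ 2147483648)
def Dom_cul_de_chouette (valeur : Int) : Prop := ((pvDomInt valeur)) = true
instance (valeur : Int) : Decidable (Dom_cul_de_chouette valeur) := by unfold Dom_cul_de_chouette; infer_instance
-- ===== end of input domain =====

-- B replaces the three fixed nested loops by a recursive descent picking die values in
-- non-decreasing order while reducing the remaining target sum (alternative decomposition).

-- ===== PORT A =====
def cul_de_chouette (valeur : Int) : List (Int × Int × Int) :=
  (PySem.List.pyRange 1 7 1).foldl (fun res i =>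
    (PySem.List.pyRange i 7 1).foldl (fun res j =>
      (PySem.List.pyRange j 7 1).foldl (fun res k =>
        if k + i + j = valeur then res ++ [(i, j, k)] else res) res) res) []

-- ===== PORT B =====
-- recursive helper 'go' of Source B: pick each die ≥ lo, recurse on the remaining sum
def cdcGo : Int → Nat → Int → List (List Int)
  | _, 0, _ => []   -- unreachable (Source B is only called with 3 dice); total for the recursion
  | lo, 1, t => if lo ≤ t ∧ t ≤ 6 then [[t]] else []
  | lo, (n+2), t =>
      (PySem.List.pyRange lo 7 1).foldl
        (fun out d => (cdcGo d (n+1) (t - d)).foldl (fun o rest => o ++ [d :: rest]) out) []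

def cul_de_chouette_alt (valeur : Int) : List (Int × Int × Int) :=
  (cdcGo 1 3 valeur).map (fun t =>
    match t with
    | [a, b, c] => (a, b, c)
    | _ => (0, 0, 0))   -- lists produced by cdcGo 1 3 always have 3 entries; Python tuples them

-- ===== PRECONDITION & SPEC =====
def Spec_cul_de_chouette (valeur : Int) (out : List (Int × Int × Int)) : Prop := out = cul_de_chouette_alt valeur
instance (valeur : Int) (out : List (Int × Int × Int)) : Decidable (Spec_cul_de_chouette valeur out) := by unfold Spec_cul_de_chouette; infer_instance

-- ===== CLAIM (what is proved, stated in full; the proofs are below) =====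
def Claim_equal_cul_de_chouette : Prop := ∀ (valeur : Int), Dom_cul_de_chouette valeur → Spec_cul_de_chouette valeur (cul_de_chouette valeur)

-- ===== LEMMAS AND PROOFS =====

-- A as a flatMap of filters (loop shape, via the named PySem fold lemmas)
theorem culA_flatMap (valeur : Int) :
    cul_de_chouette valeur =
      (PySem.List.pyRange 1 7 1).flatMap (fun i =>
        (PySem.List.pyRange i 7 1).flatMap (fun j =>
          ((PySem.List.pyRange j 7 1).filter (fun k => decide (k + i + j = valeur))).map
            (fun k => (i, j, k)))) := by
  unfold cul_de_chouette
  simp only [PySem.List.foldl_append_ite, PySem.List.foldl_append_eq_flatMap,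
    List.nil_append]

theorem culA_nil (valeur : Int) (h : valeur < 3 ∨ 18 < valeur) :
    cul_de_chouette valeur = [] := by
  rw [culA_flatMap]
  rw [List.flatMap_eq_nil_iff]
  intro i hi
  rw [List.flatMap_eq_nil_iff]
  intro j hj
  rw [List.map_eq_nil_iff, List.filter_eq_nil_iff]
  intro k hk
  rw [PySem.List.mem_pyRange_one] at hi hj hk
  simp only [decide_eq_true_eq]
  omega

-- a fold whose inner generator is always empty leaves the accumulator unchanged
theorem foldl_keep (L : List Int) (g : Int → List (List Int))
    (hg : ∀ d ∈ L, g d = []) (acc : List (List Int)) :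
    L.foldl (fun out d => (g d).foldl (fun o rest => o ++ [d :: rest]) out) acc = acc := by
  induction L generalizing acc with
  | nil => rfl
  | cons a L ih =>
    rw [List.foldl_cons, hg a (by simp)]
    exact ih (fun d hd => hg d (by simp [hd])) acc

theorem cdcGo_one_nil (lo t : Int) (h : t < lo ∨ 6 < t) : cdcGo lo 1 t = [] := by
  unfold cdcGo
  rw [if_neg]
  omega

theorem cdcGo_two_nil (lo t : Int) (h : t < 2 * lo ∨ 12 < t) :
    cdcGo lo 2 t = [] := by
  show (PySem.List.pyRange lo 7 1).foldl
      (fun out d => (cdcGo d 1 (t - d)).foldl (fun o rest => o ++ [d :: rest]) out) [] = []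
  apply foldl_keep
  intro d hd
  rw [PySem.List.mem_pyRange_one] at hd
  exact cdcGo_one_nil d (t - d) (by omega)

theorem cdcGo_three_nil (t : Int) (h : t < 3 ∨ 18 < t) : cdcGo 1 3 t = [] := by
  show (PySem.List.pyRange 1 7 1).foldl
      (fun out d => (cdcGo d 2 (t - d)).foldl (fun o rest => o ++ [d :: rest]) out) [] = []
  apply foldl_keep
  intro d hd
  rw [PySem.List.mem_pyRange_one] at hd
  exact cdcGo_two_nil d (t - d) (by omega)

theorem culB_nil (valeur : Int) (h : valeur < 3 ∨ 18 < valeur) :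
    cul_de_chouette_alt valeur = [] := by
  unfold cul_de_chouette_alt
  rw [cdcGo_three_nil valeur h]
  rfl

-- ===== VERDICT (by name: the statement is the Claim_ definition above) =====
theorem cul_de_chouette_spec : Claim_equal_cul_de_chouette := by
  intro valeur _
  unfold Spec_cul_de_chouette
  by_cases h : 3 ≤ valeur ∧ valeur ≤ 18
  · obtain ⟨h1, h2⟩ := h
    interval_cases valeur <;> decide
  · rw [culA_nil valeur (by omega), culB_nil valeur (by omega)]
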